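-- pv_equiv track=rewrite | github.com/loociano/advent-of-code | aoc2020/src/day14/solution.py | part_one
-- ===== SOURCE A (Python) =====
-- from typing import List
--
-- def part_one(program: List[str]) -> int:
--   """
--   Executes bitmask program and computes sum of values in memory.
--
--   Args:
--     program: bitmask program. It only supports 2 instructions:
--     1. Mask assignment. Example: mask = XXXXXXXXXXXXXXXXXXXXXXXXXXXXX1XXXX0X
--     2. Memory assignment. Example: mem[8] = 11
--   Returns:
--     Sum of all values left in memory after program completes.
--   """
--   mask = None
--   mem = {}
--   for line in program:
--     if 'mask' in line:
--       mask = line.split('mask = ')[1]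
--     else:  # write into memory
--       dest, value = line.split(' = ')
--       mem[dest] = apply_mask(mask, int(value))
--   return sum(mem.values())
--
-- def apply_mask(mask: str, value: int) -> int:
--   """
--   Applies mask to a value with following rules:
--   - 0 or 1 overwrites the corresponding bit in the value
--   - X leaves the bit in the value unchanged
--
--   Args:
--     mask: 36-character string. Accepted values are X, 0 and 1.
--     value: to integer to apply the mask to.
--   Returns:
--     Integer resulting from applying the mask to the input integer.
--   """
--   result = value
--   for i, mask_value in enumerate(mask):
--     pos = len(mask) - i - 1
--     if mask_value == '0' and (value & (1 << pos)) >> pos == 1: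
--       result -= 1 << pos  # Overwrite
--     elif mask_value == '1' and (value & (1 << pos)) >> pos == 0:
--       result += 1 << pos  # Overwrite
--   return result
-- ===== SOURCE B (Python) =====
-- from typing import List
--
-- def part_one(program: List[str]) -> int:
--   mask = None
--   mem = {}
--   for line in program:
--     if 'mask' in line:
--       mask = line.split('mask = ')[1]
--     else:
--       dest, value = line.split(' = ')
--       mem[dest] = _apply(mask, int(value))
--   return sum(mem.values())
--
-- def _apply(mask: str, value: int) -> int:
--   # Rebuild the result from the least-significant end: pull binary digits off
--   # the value with divmod and emit the forced digit instead where the mask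
--   # says '0' or '1'; whatever is left of the value keeps the high bits.
--   res, place, v = 0, 1, value
--   for c in reversed(mask):
--     v, b = divmod(v, 2)
--     res += place * (1 if c == '1' else 0 if c == '0' else b)
--     place *= 2
--   return res + v * place
-- ===== Notes on version B (the rewrite author's own statement) =====
-- stated objective: alternative
-- what changed: apply_mask no longer tests each bit of the value with shift/AND and adds or subtracts correction powers of two; B rebuilds the result from the least-significant end by pulling binary digits off the value with divmod and substituting the forced digits, using no bitwise operators; the line-parsing loop is unchanged.
import Mathlib
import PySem

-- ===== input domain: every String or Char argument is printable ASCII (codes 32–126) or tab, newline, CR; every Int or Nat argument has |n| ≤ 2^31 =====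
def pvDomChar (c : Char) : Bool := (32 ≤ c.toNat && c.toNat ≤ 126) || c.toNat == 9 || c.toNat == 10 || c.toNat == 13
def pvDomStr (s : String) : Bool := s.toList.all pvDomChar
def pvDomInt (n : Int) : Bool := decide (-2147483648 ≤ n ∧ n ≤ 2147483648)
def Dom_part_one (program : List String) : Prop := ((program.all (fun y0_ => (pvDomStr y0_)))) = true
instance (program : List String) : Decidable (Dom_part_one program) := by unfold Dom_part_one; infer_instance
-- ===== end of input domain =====

-- B replaces apply_mask's per-position bit-test-and-correct loop (shifts/ANDs against the
-- original value) by a divmod digit stream that rebuilds the result from the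
-- least-significant end with no bitwise operators; the line-parsing loop is unchanged.

-- ===== PORT A =====
-- for i, mask_value in enumerate(mask): pos = len(mask)-i-1; conditional ± (1 << pos)
def applyMaskGo (L : Nat) (value : Int) : List Char → Nat → Int → Int
  | [], _, result => result
  | c :: rest, i, result =>
    applyMaskGo L value rest (i + 1)
      (if c = '0' ∧ (PySem.Int.band value ((1:Int) <<< (L - i - 1))) >>> (L - i - 1) = 1 then
         result - (1:Int) <<< (L - i - 1)
       else if c = '1' ∧ (PySem.Int.band value ((1:Int) <<< (L - i - 1))) >>> (L - i - 1) = 0 then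
         result + (1:Int) <<< (L - i - 1)
       else result)

def apply_mask (mask : String) (value : Int) : Int :=
  applyMaskGo mask.toList.length value mask.toList 0 value

def part_one (program : List String) : Int :=
  let st := program.foldl
    (fun (st : Option String × PySem.Dict String Int) line =>
      if PySem.Str.isIn "mask" line then
        (some (((PySem.Str.split? line "mask = ").getD []).getD 1 ""), st.2)
      else
        let parts := (PySem.Str.split? line " = ").getD []
        let dest := parts.getD 0 ""
        let value := (PySem.Int.ofStr? (parts.getD 1 "")).getD 0
        (st.1, st.2.insert dest (apply_mask (st.1.getD "") value)))
    (none, PySem.Dict.empty)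
  st.2.values.sum

-- ===== PORT B =====
-- res, place, v = 0, 1, value; for c in reversed(mask): v, b = divmod(v, 2); …
def altStep (st : Int × Int × Int) (c : Char) : Int × Int × Int :=
  let b := PySem.Int.mod st.2.2 2
  let v := PySem.Int.floordiv st.2.2 2
  (st.1 + st.2.1 * (if c = '1' then 1 else if c = '0' then 0 else b), st.2.1 * 2, v)

def apply_alt (mask : String) (value : Int) : Int :=
  let st := mask.toList.reverse.foldl altStep (0, 1, value)
  st.1 + st.2.2 * st.2.1

def part_one_alt (program : List String) : Int :=
  let st := program.foldl
    (fun (st : Option String × PySem.Dict String Int) line =>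
      if PySem.Str.isIn "mask" line then
        (some (((PySem.Str.split? line "mask = ").getD []).getD 1 ""), st.2)
      else
        let parts := (PySem.Str.split? line " = ").getD []
        let dest := parts.getD 0 ""
        let value := (PySem.Int.ofStr? (parts.getD 1 "")).getD 0
        (st.1, st.2.insert dest (apply_alt (st.1.getD "") value)))
    (none, PySem.Dict.empty)
  st.2.values.sum

-- ===== PRECONDITION & SPEC =====
def isMaskLine (line : String) : Bool := PySem.Str.isIn "mask" line
-- a mask line must contain 'mask = ' (else A's [1] raises IndexError)
def maskLineOk (line : String) : Prop := 2 ≤ ((PySem.Str.split? line "mask = ").getD []).length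
-- a memory line must split on ' = ' into exactly two pieces whose second parses as int
def memLineOk (line : String) : Prop :=
  ((PySem.Str.split? line " = ").getD []).length = 2 ∧
  (PySem.Int.ofStr? (((PySem.Str.split? line " = ").getD []).getD 1 "")).isSome = true

-- Pre_ excludes exactly the programs on which the Python A raises: a line containing
-- 'mask' but not 'mask = ' (IndexError), a memory line that does not split on ' = ' into
-- exactly two pieces or whose value is not an int literal (ValueError), and a memory line
-- before any mask line (TypeError on mask = None).
def Pre_part_one (program : List String) : Prop :=
  ∀ i < program.length,
    if isMaskLine (program.getD i "") then maskLineOk (program.getD i "")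
    else memLineOk (program.getD i "") ∧ ∃ j < i, isMaskLine (program.getD j "") = true
instance (program : List String) : Decidable (Pre_part_one program) := by
  unfold Pre_part_one isMaskLine maskLineOk memLineOk; infer_instance

def pvWitness_part_one : List String := ["mask = X10X", "mem[8] = 11", "mem[7] = -5"]

def Spec_part_one (program : List String) (out : Int) : Prop := out = part_one_alt program
instance (program : List String) (out : Int) : Decidable (Spec_part_one program out) := by
  unfold Spec_part_one; infer_instance

-- ===== CLAIM (what is proved, stated in full; the proofs are below) =====
def Claim_equal_part_one : Prop :=
  ∀ (program : List String), Dom_part_one program → Pre_part_one program →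
    Spec_part_one program (part_one program)

-- ===== LEMMAS AND PROOFS =====

-- common specification of both mask applications, phrased on the reversed mask
def forceBit (c : Char) (b : Int) : Int := if c = '1' then 1 else if c = '0' then 0 else b

def G : List Char → Int → Int
  | [], v => v
  | c :: r, v => 2 * G r (PySem.Int.floordiv v 2) + forceBit c (PySem.Int.mod v 2)

lemma shl_one (p : Nat) : (1:Int) <<< p = (2:Int) ^ p := by
  have h : (1:Int) <<< p = (((1 <<< p : Nat) : Int)) := rfl
  rw [h, Nat.shiftLeft_eq]; push_cast; ring

lemma floordiv_one (v : Int) : PySem.Int.floordiv v 1 = v := by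
  rw [PySem.Int.floordiv_eq_ediv_of_pos (by norm_num)]; exact Int.ediv_one v

lemma floordiv_floordiv_two (v : Int) (n : Nat) :
    PySem.Int.floordiv (PySem.Int.floordiv v 2) ((2:Int) ^ n) = PySem.Int.floordiv v ((2:Int) ^ (n + 1)) := by
  rw [PySem.Int.floordiv_eq_ediv_of_pos (by positivity),
      PySem.Int.floordiv_eq_ediv_of_pos (by norm_num),
      PySem.Int.floordiv_eq_ediv_of_pos (by positivity),
      Int.ediv_ediv_of_nonneg (by norm_num : (0:Int) ≤ 2), pow_succ]
  ring_nf

lemma bitTest (v : Int) (p : Nat) :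
    (PySem.Int.band v ((1:Int) <<< p)) >>> p
      = PySem.Int.mod (PySem.Int.floordiv v ((2:Int) ^ p)) 2 := by
  have h2 : ((2:Int)) ^ p = ((2 ^ p : Nat) : Int) := by push_cast; ring
  have hsh : (1:Int) <<< p = ((2 ^ p : Nat) : Int) := by rw [shl_one, h2]
  rcases v with m | m
  · rw [Int.ofNat_eq_natCast, hsh, PySem.Int.band_natCast]
    have hshift : (((m &&& 2 ^ p : Nat)) : Int) >>> p = (((m &&& 2 ^ p) >>> p : Nat) : Int) := rfl
    rw [hshift, Nat.shiftRight_eq_div_pow, Nat.and_two_pow,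
        Nat.mul_div_cancel _ (by positivity), Nat.testBit_eq_decide_div_mod_eq,
        h2, PySem.Int.floordiv_natCast]
    have hmod := PySem.Int.mod_natCast (m / 2 ^ p) 2
    simp only [Nat.cast_ofNat] at hmod
    rw [hmod]
    rcases Nat.mod_two_eq_zero_or_one (m / 2 ^ p) with h | h <;> simp [h]
  · rw [Int.negSucc_eq, hsh]
    have hband : PySem.Int.band (-(↑m + 1)) ((2 ^ p : Nat) : Int)
        = ((2 ^ p - (2 ^ p &&& m) : Nat) : Int) := by
      simp only [PySem.Int.band]
      rw [if_neg (by omega), if_pos (by positivity)]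
      have hm : (-(-(↑m + 1)) - 1 : Int) = (m : Int) := by ring
      rw [hm, Int.toNat_natCast, Int.toNat_natCast]
    rw [hband]
    have hshift : (((2 ^ p - (2 ^ p &&& m) : Nat)) : Int) >>> p
        = ((((2 ^ p - (2 ^ p &&& m)) >>> p : Nat)) : Int) := rfl
    have hand : 2 ^ p &&& m = (m.testBit p).toNat * 2 ^ p := by
      rw [Nat.and_comm]; exact Nat.and_two_pow m p
    rw [hshift, Nat.shiftRight_eq_div_pow, hand, Nat.testBit_eq_decide_div_mod_eq]
    have hP : (0:Int) < (2:Int) ^ p := by positivity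
    have h1 : (2:Int) ^ p * ((m / 2 ^ p : Nat) : Int) + ((m % 2 ^ p : Nat) : Int) = (m : Int) := by
      exact_mod_cast Nat.div_add_mod m (2 ^ p)
    have hlt : ((m % 2 ^ p : Nat) : Int) < (2:Int) ^ p := by
      exact_mod_cast Nat.mod_lt m (by positivity)
    have hq : PySem.Int.floordiv (-(↑m + 1)) ((2:Int) ^ p) = -((m / 2 ^ p : Nat) : Int) - 1 := by
      rw [PySem.Int.floordiv_eq_iff_of_pos hP]
      constructor <;> nlinarith
    rw [hq, PySem.Int.mod_eq_emod_of_pos (by norm_num)]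
    rcases Nat.mod_two_eq_zero_or_one (m / 2 ^ p) with h | h <;>
      · set q := m / 2 ^ p with hqd
        rw [h]
        norm_num [Nat.div_self (show 0 < 2 ^ p by positivity)]
        omega

lemma G_snoc (r : List Char) (c : Char) (v : Int) :
    G (r ++ [c]) v =
      G r v + (forceBit c (PySem.Int.mod (PySem.Int.floordiv v ((2:Int) ^ r.length)) 2)
               - PySem.Int.mod (PySem.Int.floordiv v ((2:Int) ^ r.length)) 2) * (2:Int) ^ r.length := by
  induction r generalizing v with
  | nil =>
    simp only [List.nil_append, List.length_nil, pow_zero, G, floordiv_one, mul_one]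
    have hdm := PySem.Int.floordiv_mul_add_mod v 2
    linarith
  | cons d r' ih =>
    simp only [List.cons_append, G, List.length_cons, ih, floordiv_floordiv_two, pow_succ]
    ring

lemma foldB_eq (r : List Char) : ∀ (res place v : Int),
    (r.foldl altStep (res, place, v)).1
      + (r.foldl altStep (res, place, v)).2.2 * (r.foldl altStep (res, place, v)).2.1
      = res + place * G r v := by
  induction r with
  | nil => intro res place v; simp [G]; ring
  | cons c r' ih =>
    intro res place v
    simp only [List.foldl, altStep]
    rw [ih]
    simp only [G, forceBit]
    ring

lemma applyMaskGo_eq (t : List Char) : ∀ (i : Nat) (v r : Int),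
    applyMaskGo (i + t.length) v t i r = r + (G t.reverse v - v) := by
  induction t with
  | nil => intro i v r; simp [applyMaskGo, G]
  | cons c t' ih =>
    intro i v r
    have hL : i + (c :: t').length = (i + 1) + t'.length := by simp [List.length_cons]; omega
    rw [hL]
    simp only [applyMaskGo]
    have hpos : (i + 1) + t'.length - i - 1 = t'.length := by omega
    rw [hpos, ih]
    rw [List.reverse_cons, G_snoc, List.length_reverse, bitTest, shl_one]
    have hb0 : 0 ≤ PySem.Int.mod (PySem.Int.floordiv v ((2:Int) ^ t'.length)) 2 :=
      PySem.Int.mod_nonneg _ (by norm_num)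
    have hb2 : PySem.Int.mod (PySem.Int.floordiv v ((2:Int) ^ t'.length)) 2 < 2 :=
      PySem.Int.mod_lt _ (by norm_num)
    have hb : PySem.Int.mod (PySem.Int.floordiv v ((2:Int) ^ t'.length)) 2 = 0 ∨
        PySem.Int.mod (PySem.Int.floordiv v ((2:Int) ^ t'.length)) 2 = 1 := by omega
    rcases hb with hb | hb <;> rw [hb] <;> by_cases hc0 : c = '0' <;> by_cases hc1 : c = '1' <;>
      first
        | (exfalso; rw [hc0] at hc1; exact absurd hc1 (by decide))
        | (subst hc0; norm_num [forceBit]; try ring)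
        | (subst hc1; norm_num [forceBit]; try ring)
        | (norm_num [forceBit, hc0, hc1]; try ring)
    all_goals first
      | assumption
      | (simp [show ¬('0':Char) = '1' from by decide]; try ring)

lemma apply_eq : apply_mask = apply_alt := by
  funext mask value
  have hA := applyMaskGo_eq mask.toList 0 value value
  have hB := foldB_eq mask.toList.reverse 0 1 value
  rw [Nat.zero_add] at hA
  simp only [apply_mask, apply_alt, hA, hB]
  ring

-- ===== VERDICT (by name: the statement is the Claim_ definition above) =====
theorem part_one_spec : Claim_equal_part_one := by
  intro program _ _
  unfold Spec_part_one part_one part_one_alt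
  rw [apply_eq]
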